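-- pv_equiv track=rewrite | github.com/MaxAdmk/Algorithms_1_lab | pumkin_seeds.py | generate_pumpkin_order
-- ===== SOURCE A (Python) =====
-- def generate_pumpkin_order(m, n):
--     matrix = [[0 for _ in range(n)] for _ in range(m)]
--     order = []
--     for i in range(m):
--         if i % 2 == 0:
--             for j in range(n):
--                 matrix[i][j] = i * n + j + 1
--         else:
--             for j in range(n - 1, -1, -1):
--                 matrix[i][j] = i * n + (n - 1 - j) + 1
--
--     for row in matrix:
--         order.extend(row)
--
--     return order
-- ===== SOURCE B (Python) =====
-- def generate_pumpkin_order(m, n):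
--     total = max(m, 0) * max(n, 0)
--     return [k - k % n + (k % n + 1 if (k // n) % 2 == 0 else n - k % n)
--             for k in range(total)]
-- ===== Notes on version B (the rewrite author's own statement) =====
-- stated objective: alternative
-- what changed: B replaces A's row-by-row matrix fill plus a second flatten pass by a closed-form positional formula: for each flat index k it computes the value directly from k//n and k%n in one comprehension, never materialising rows or a matrix.
import Mathlib
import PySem

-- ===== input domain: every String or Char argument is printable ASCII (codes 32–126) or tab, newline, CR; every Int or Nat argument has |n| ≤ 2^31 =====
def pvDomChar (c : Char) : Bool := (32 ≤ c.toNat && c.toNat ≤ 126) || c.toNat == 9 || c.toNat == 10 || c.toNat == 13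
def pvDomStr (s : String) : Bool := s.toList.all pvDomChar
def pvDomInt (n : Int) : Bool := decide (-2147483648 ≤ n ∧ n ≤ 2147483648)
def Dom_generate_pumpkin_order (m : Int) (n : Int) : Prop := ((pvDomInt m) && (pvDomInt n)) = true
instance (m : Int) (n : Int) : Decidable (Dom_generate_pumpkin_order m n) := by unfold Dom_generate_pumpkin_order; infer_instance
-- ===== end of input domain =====

-- B computes each entry by a closed-form positional formula from the flat index k (row k//n,
-- column k%n) in a single comprehension, instead of A's matrix fill plus flatten (objective: alternative).

-- ===== PORT A =====
-- matrix[i][j] = v is modelled by pyGetD/pySetD; the loop indices i, j are always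
-- nonnegative and in range here, where pyGetD/pySetD agree exactly with Python.
def generate_pumpkin_order (m : Int) (n : Int) : List Int :=
  let matrix : List (List Int) :=
    (PySem.List.pyRange 0 m 1).map (fun _ => (PySem.List.pyRange 0 n 1).map (fun _ => (0 : Int)))
  let matrix :=
    (PySem.List.pyRange 0 m 1).foldl (fun mat i =>
      if i % 2 == 0 then
        (PySem.List.pyRange 0 n 1).foldl (fun mat j =>
          PySem.List.pySetD mat i (PySem.List.pySetD (PySem.List.pyGetD mat i []) j (i * n + j + 1))) mat
      else
        (PySem.List.pyRange (n - 1) (-1) (-1)).foldl (fun mat j =>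
          PySem.List.pySetD mat i (PySem.List.pySetD (PySem.List.pyGetD mat i []) j (i * n + (n - 1 - j) + 1))) mat) matrix
  matrix.foldl (fun order row => order ++ row) []

-- ===== PORT B =====
-- 'k % n' / 'k // n' are only reached when total > 0 (hence n > 0), matching the Python,
-- where the comprehension body never runs on an empty range.
def generate_pumpkin_order_alt (m : Int) (n : Int) : List Int :=
  let total := max m 0 * max n 0
  (PySem.List.pyRange 0 total 1).map (fun k =>
    k - PySem.Int.mod k n +
      (if PySem.Int.mod (PySem.Int.floordiv k n) 2 == 0
       then PySem.Int.mod k n + 1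
       else n - PySem.Int.mod k n))

-- ===== PRECONDITION & SPEC =====
def Spec_generate_pumpkin_order (m : Int) (n : Int) (out : List Int) : Prop := out = generate_pumpkin_order_alt m n
instance (m : Int) (n : Int) (out : List Int) : Decidable (Spec_generate_pumpkin_order m n out) := by unfold Spec_generate_pumpkin_order; infer_instance

-- ===== CLAIM (what is proved, stated in full; the proofs are below) =====
def Claim_equal_generate_pumpkin_order : Prop := ∀ (m : Int) (n : Int), Dom_generate_pumpkin_order m n → Spec_generate_pumpkin_order m n (generate_pumpkin_order m n)

-- ===== LEMMAS AND PROOFS =====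

-- the final content of row i (block on even rows, reversed block on odd rows)
def pvRowVal (n i : Int) : List Int :=
  let block := PySem.List.pyRange (i * n + 1) (i * n + n + 1) 1
  if i % 2 == 0 then block else block.reverse

-- B's closed-form body
def pvF (n k : Int) : Int :=
  k - PySem.Int.mod k n +
    (if PySem.Int.mod (PySem.Int.floordiv k n) 2 == 0
     then PySem.Int.mod k n + 1
     else n - PySem.Int.mod k n)

theorem pv_take_set {a : Type} (xs : List a) (k : Nat) (v : a) (h : k < xs.length) :
    (xs.set k v).take (k+1) = xs.take k ++ [v] := by
  rw [List.set_eq_take_append_cons_drop, if_pos h]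
  rw [show k + 1 = (xs.take k).length + 1 by simp [List.length_take]; omega]
  rw [List.take_append]
  simp

theorem pv_drop_set {a : Type} (xs : List a) (k : Nat) (v : a) (h : k < xs.length) :
    (xs.set k v).drop k = v :: xs.drop (k+1) := by
  rw [List.set_eq_take_append_cons_drop, if_pos h]
  rw [show k = (xs.take k).length by simp [List.length_take]; omega]
  simp

theorem pv_even_row (n i : Int) : ∀ (fuel : Nat) (a : Int) (r0 : List Int),
    (n - a).toNat = fuel → 0 ≤ a → r0.length = n.toNat →
    (PySem.List.pyRange a n 1).foldl (fun r j => PySem.List.pySetD r j (i * n + j + 1)) r0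
      = r0.take a.toNat ++ PySem.List.pyRange (i * n + a + 1) (i * n + n + 1) 1 := by
  intro fuel
  induction fuel with
  | zero =>
    intro a r0 hf ha hr
    rw [PySem.List.pyRange_one_eq_nil (by omega : n ≤ a), PySem.List.pyRange_one_eq_nil (by omega : i*n+n+1 ≤ i*n+a+1)]
    rw [List.foldl_nil, List.append_nil, List.take_of_length_le (by omega)]
  | succ k ih =>
    intro a r0 hf ha hr
    rw [PySem.List.pyRange_one_cons (by omega : a < n)]
    simp only [List.foldl_cons]
    rw [PySem.List.pySetD_of_nonneg _ _ ha]
    rw [ih (a+1) _ (by omega) (by omega) (by simpa using hr)]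
    rw [show (a+1).toNat = a.toNat + 1 by omega]
    rw [pv_take_set _ _ _ (by omega)]
    rw [PySem.List.pyRange_one_cons (by omega : i*n+a+1 < i*n+n+1)]
    rw [show i*n+(a+1)+1 = (i*n+a+1)+1 by ring]
    simp

theorem pv_odd_row (n i : Int) : ∀ (fuel : Nat) (a : Int) (r0 : List Int),
    (a + 1).toNat = fuel → a < n → r0.length = n.toNat →
    (PySem.List.pyRange a (-1) (-1)).foldl (fun r j => PySem.List.pySetD r j (i * n + (n - 1 - j) + 1)) r0
      = (PySem.List.pyRange (i * n + n - a) (i * n + n + 1) 1).reverse ++ r0.drop (a + 1).toNat := by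
  intro fuel
  induction fuel with
  | zero =>
    intro a r0 hf ha hr
    rw [PySem.List.pyRange_neg_one_eq_nil (by omega), PySem.List.pyRange_one_eq_nil (by omega)]
    simp [show (a+1).toNat = 0 from hf]
  | succ k ih =>
    intro a r0 hf ha hr
    have ha0 : (0:Int) ≤ a := by omega
    rw [PySem.List.pyRange_neg_one_cons (by omega : (-1:Int) < a)]
    simp only [List.foldl_cons]
    rw [PySem.List.pySetD_of_nonneg _ _ ha0]
    rw [ih (a-1) _ (by omega) (by omega) (by simpa using hr)]
    rw [show a - 1 + 1 = a by ring]
    rw [pv_drop_set _ _ _ (by omega)]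
    rw [PySem.List.pyRange_one_cons (by omega : i*n+n-a < i*n+n+1)]
    rw [show i*n+n-(a-1) = (i*n+n-a)+1 by ring, show (a+1).toNat = a.toNat + 1 by omega,
        show i*n+(n-1-a)+1 = i*n+n-a by ring]
    simp

theorem pv_row_update (js : List Int) : ∀ (mat : List (List Int)) (a : Int)
    (g : List Int → Int → List Int), 0 ≤ a → a.toNat < mat.length →
    js.foldl (fun mat j => PySem.List.pySetD mat a (g (PySem.List.pyGetD mat a []) j)) mat
      = PySem.List.pySetD mat a (js.foldl g (PySem.List.pyGetD mat a [])) := by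
  induction js with
  | nil =>
    intro mat a g ha hlt
    simp only [List.foldl_nil]
    rw [PySem.List.pySetD_of_nonneg _ _ ha, PySem.List.pyGetD_of_nonneg _ _ ha,
        List.getD_eq_getElem _ _ hlt]
    exact (List.set_getElem_self hlt).symm
  | cons j js ih =>
    intro mat a g ha hlt
    simp only [List.foldl_cons]
    rw [ih _ a g ha (by rw [PySem.List.pySetD_of_nonneg _ _ ha]; simpa using hlt)]
    rw [PySem.List.pySetD_of_nonneg _ _ ha, PySem.List.pySetD_of_nonneg _ _ ha,
        PySem.List.pySetD_of_nonneg _ _ ha, PySem.List.pyGetD_of_nonneg _ _ ha,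
        PySem.List.pyGetD_of_nonneg _ _ ha]
    rw [List.set_set]
    congr 1
    congr 1
    simp [List.getD, hlt]

theorem pv_zeros_len (n : Int) :
    ((PySem.List.pyRange 0 n 1).map (fun _ => (0 : Int))).length = n.toNat := by
  simp [PySem.List.length_pyRange_one]

theorem pv_outer (m n : Int) : ∀ (fuel : Nat) (a : Int) (mat : List (List Int)),
    (m - a).toNat = fuel → 0 ≤ a → mat.length = m.toNat →
    (∀ k, a.toNat ≤ k → k < mat.length →
        mat.getD k [] = (PySem.List.pyRange 0 n 1).map (fun _ => (0 : Int))) →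
    (PySem.List.pyRange a m 1).foldl (fun mat i =>
      if i % 2 == 0 then
        (PySem.List.pyRange 0 n 1).foldl (fun mat j =>
          PySem.List.pySetD mat i (PySem.List.pySetD (PySem.List.pyGetD mat i []) j (i * n + j + 1))) mat
      else
        (PySem.List.pyRange (n - 1) (-1) (-1)).foldl (fun mat j =>
          PySem.List.pySetD mat i (PySem.List.pySetD (PySem.List.pyGetD mat i []) j (i * n + (n - 1 - j) + 1))) mat) mat
      = mat.take a.toNat ++ (PySem.List.pyRange a m 1).map (pvRowVal n) := by
  intro fuel
  induction fuel with
  | zero =>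
    intro a mat hf ha hlen hrow
    rw [PySem.List.pyRange_one_eq_nil (by omega : m ≤ a)]
    rw [List.foldl_nil, List.map_nil, List.append_nil, List.take_of_length_le (by omega)]
  | succ k ih =>
    intro a mat hf ha hlen hrow
    have hlt : a.toNat < mat.length := by omega
    have hz : PySem.List.pyGetD mat a [] = (PySem.List.pyRange 0 n 1).map (fun _ => (0 : Int)) := by
      rw [PySem.List.pyGetD_of_nonneg _ _ ha]; exact hrow a.toNat le_rfl hlt
    rw [PySem.List.pyRange_one_cons (by omega : a < m)]
    simp only [List.foldl_cons]
    have hstep : (if a % 2 == 0 then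
        (PySem.List.pyRange 0 n 1).foldl (fun mat j =>
          PySem.List.pySetD mat a (PySem.List.pySetD (PySem.List.pyGetD mat a []) j (a * n + j + 1))) mat
      else
        (PySem.List.pyRange (n - 1) (-1) (-1)).foldl (fun mat j =>
          PySem.List.pySetD mat a (PySem.List.pySetD (PySem.List.pyGetD mat a []) j (a * n + (n - 1 - j) + 1))) mat)
        = PySem.List.pySetD mat a (pvRowVal n a) := by
      by_cases hpar : a % 2 == 0
      · rw [if_pos hpar]
        refine (pv_row_update (PySem.List.pyRange 0 n 1) mat a
          (fun r j => PySem.List.pySetD r j (a * n + j + 1)) ha hlt).trans ?_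
        congr 1
        rw [hz, pv_even_row n a (n - 0).toNat 0 _ rfl le_rfl (pv_zeros_len n)]
        unfold pvRowVal
        rw [if_pos hpar]
        simp
      · rw [if_neg hpar]
        refine (pv_row_update (PySem.List.pyRange (n-1) (-1) (-1)) mat a
          (fun r j => PySem.List.pySetD r j (a * n + (n - 1 - j) + 1)) ha hlt).trans ?_
        congr 1
        rw [hz, pv_odd_row n a ((n-1) + 1).toNat (n-1) _ rfl (by omega) (pv_zeros_len n)]
        unfold pvRowVal
        rw [if_neg hpar]
        rw [show a*n+n-(n-1) = a*n+1 by ring]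
        rw [List.drop_of_length_le (by rw [pv_zeros_len n]; omega)]
        simp
    rw [hstep, PySem.List.pySetD_of_nonneg _ _ ha]
    rw [ih (a+1) _ (by omega) (by omega) (by simpa using hlen)
        (by
          intro k2 hk2 hk2'
          simp only [List.length_set] at hk2'
          rw [List.getD, List.getElem?_set_ne (by omega)]
          exact hrow k2 (by omega) hk2')]
    rw [show (a+1).toNat = a.toNat + 1 by omega]
    rw [pv_take_set _ _ _ hlt]
    simp

-- A as a flatMap of row contents
theorem pv_A_eq_flatMap (m n : Int) :
    generate_pumpkin_order m n = (PySem.List.pyRange 0 m 1).flatMap (pvRowVal n) := by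
  simp only [generate_pumpkin_order]
  rw [pv_outer m n (m - 0).toNat 0 _ rfl le_rfl
      (by simp [PySem.List.length_pyRange_one])
      (by
        intro k hk hk'
        simp only [List.length_map] at hk'
        rw [List.getD_eq_getElem _ _ (by simpa using hk')]
        simp)]
  rw [PySem.List.foldl_append_eq_flatten]
  simp [List.flatMap_def]

-- map of an affine shift over a range
theorem pv_map_add_one (a b : Int) :
    (PySem.List.pyRange a b 1).map (fun k => k + 1) = PySem.List.pyRange (a+1) (b+1) 1 := by
  rw [PySem.List.pyRange_one, PySem.List.pyRange_one, List.map_map]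
  rw [show (b+1-(a+1)).toNat = (b-a).toNat by omega]
  refine List.map_congr_left ?_
  intro x _
  simp [Function.comp]
  ring

-- map of a reflection over a range is a countdown range
theorem pv_map_sub (a b c : Int) :
    (PySem.List.pyRange a b 1).map (fun k => c - k) = PySem.List.pyRange (c-a) (c-b) (-1) := by
  rw [PySem.List.pyRange_one, PySem.List.pyRange_neg_one, List.map_map]
  rw [show (c-a-(c-b)).toNat = (b-a).toNat by omega]
  refine List.map_congr_left ?_
  intro x _
  simp [Function.comp]
  ring

-- one row-block of B's closed form equals that row's content
theorem pv_block (n : Int) (hn : 0 < n) (t : Int) :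
    (PySem.List.pyRange (t*n) (t*n+n) 1).map (pvF n) = pvRowVal n t := by
  have hdiv : ∀ k, t*n ≤ k → k < t*n+n → PySem.Int.floordiv k n = t := by
    intro k h1 h2
    rw [PySem.Int.floordiv_eq_iff_of_pos hn]
    constructor
    · omega
    · have : (t+1)*n = t*n + n := by ring
      omega
  have hmod : ∀ k, t*n ≤ k → k < t*n+n → PySem.Int.mod k n = k - t*n := by
    intro k h1 h2
    have h := PySem.Int.floordiv_mul_add_mod k n
    rw [hdiv k h1 h2] at h
    omega
  have hcong : (PySem.List.pyRange (t*n) (t*n+n) 1).map (pvF n)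
      = (PySem.List.pyRange (t*n) (t*n+n) 1).map
          (fun k => if PySem.Int.mod t 2 == 0 then k + 1 else 2*t*n + n - k) := by
    refine List.map_congr_left ?_
    intro k hk
    rw [PySem.List.mem_pyRange_one] at hk
    unfold pvF
    rw [hdiv k hk.1 hk.2, hmod k hk.1 hk.2]
    by_cases hpar : PySem.Int.mod t 2 == 0
    · rw [if_pos hpar, if_pos hpar]; ring
    · rw [if_neg hpar, if_neg hpar]; ring
  rw [hcong]
  unfold pvRowVal
  have hpar2 : (PySem.Int.mod t 2 == 0) = (t % 2 == 0) := by
    rw [PySem.Int.mod_eq_emod_of_pos (by omega : (0:Int) < 2)]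
  rw [hpar2]
  by_cases hpar : t % 2 == 0
  · simp only [if_pos hpar]
    rw [pv_map_add_one]
  · simp only [if_neg hpar]
    rw [pv_map_sub (t*n) (t*n+n) (2*t*n+n)]
    rw [PySem.List.pyRange_neg_one_eq_reverse]
    congr 2 <;> ring

-- B's flat map over [0, t*n) equals the flatMap of the first t rows
theorem pv_flat (n : Int) (hn : 0 < n) : ∀ (t : Nat),
    (PySem.List.pyRange 0 ((t:Int)*n) 1).map (pvF n)
      = (PySem.List.pyRange 0 (t:Int) 1).flatMap (pvRowVal n) := by
  intro t
  induction t with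
  | zero => simp [PySem.List.pyRange_one_eq_nil]
  | succ s ih =>
    have h1 : ((s:Int)) ≤ ((s+1 : Nat) : Int) := by push_cast; omega
    have h2 : (0:Int) ≤ (s:Int)*n := by positivity
    have h3 : ((s+1:Nat):Int)*n = (s:Int)*n + n := by push_cast; ring
    rw [PySem.List.pyRange_one_append 0 ((s:Int)*n) (((s+1:Nat):Int)*n) h2 (by rw [h3]; omega)]
    rw [List.map_append, ih]
    rw [show ((s+1:Nat):Int) = (s:Int) + 1 by push_cast; ring]
    rw [PySem.List.pyRange_one_succ_right (by positivity : (0:Int) ≤ (s:Int))]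
    rw [List.flatMap_append]
    congr 1
    rw [show ((s:Int)+1)*n = (s:Int)*n + n by ring]
    rw [pv_block n hn (s:Int)]
    simp [List.flatMap_def]

-- ===== VERDICT (by name: the statement is the Claim_ definition above) =====
theorem generate_pumpkin_order_spec : Claim_equal_generate_pumpkin_order := by
  intro m n _
  show generate_pumpkin_order m n = generate_pumpkin_order_alt m n
  rw [pv_A_eq_flatMap]
  simp only [generate_pumpkin_order_alt]
  by_cases hm : 0 < m
  · by_cases hn : 0 < n
    · rw [show max m 0 * max n 0 = (m.toNat : Int) * n by
        rw [max_eq_left (by omega : (0:Int) ≤ m), max_eq_left (by omega : (0:Int) ≤ n)]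
        congr 1; omega]
      rw [show ((PySem.List.pyRange 0 ((m.toNat:Int)*n) 1).map fun k =>
            k - PySem.Int.mod k n +
              (if PySem.Int.mod (PySem.Int.floordiv k n) 2 == 0
               then PySem.Int.mod k n + 1 else n - PySem.Int.mod k n))
          = (PySem.List.pyRange 0 ((m.toNat:Int)*n) 1).map (pvF n) from rfl]
      rw [pv_flat n hn m.toNat]
      rw [show ((m.toNat:Int)) = m by omega]
    · -- n ≤ 0: every row block is empty, and B's range is empty
      rw [max_eq_right (by omega : n ≤ (0:Int)), mul_zero]
      rw [PySem.List.pyRange_one_eq_nil le_rfl, List.map_nil]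
      rw [List.flatMap_eq_nil_iff.mpr]
      intro x hx
      rw [PySem.List.mem_pyRange_one] at hx
      unfold pvRowVal
      have hnil : PySem.List.pyRange (x*n+1) (x*n+n+1) 1 = [] :=
        PySem.List.pyRange_one_eq_nil (by omega)
      by_cases hpar : x % 2 == 0 <;> simp [hpar, hnil]
  · -- m ≤ 0: both sides empty
    rw [max_eq_right (by omega : m ≤ (0:Int)), zero_mul]
    rw [PySem.List.pyRange_one_eq_nil (by omega : m ≤ 0)]
    rw [PySem.List.pyRange_one_eq_nil le_rfl]
    simp
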